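-- pv_equiv track=rewrite | github.com/jakhin03/pps-game | simulation/server/controller/RestrictionForTimeFrameController.py | extract_weakly_connected_subgraph
-- ===== SOURCE A (Python) =====
-- from collections import defaultdict
-- from typing import List, Tuple, Set, Optional, Dict
--
-- def extract_weakly_connected_subgraph(graph: List[Tuple[int, int, int, int, int]]) -> List[List[Tuple[int, int, int, int, int]]]:
--     # Get weakly connected subgraphs
--     parent = {}
--
--     def find(u: int) -> int:
--         if parent[u] != u:
--             parent[u] = find(parent[u])
--         return parent[u]
--
--     def union(u: int, v: int) -> None:
--         pu, pv = find(u), find(v)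
--         if pu != pv:
--             parent[pu] = pv
--
--     # Initialize parent for each node
--     for u, v, _, _, _ in graph:
--         if u not in parent:
--             parent[u] = u
--         if v not in parent:
--             parent[v] = v
--         union(u, v)
--
--     # Group nodes by connected components
--     components = defaultdict(list)
--     for edge in graph:
--         root = find(edge[0])
--         components[root].append(edge)
--
--     return list(components.values())
-- ===== SOURCE B (Python) =====
-- # B: label propagation instead of union-find: keep a flat node->component-label dict,
-- # merging two components by rewriting every occurrence of one label; then group edges
-- # by the label of their source node, exactly like A's grouping loop.
-- def extract_weakly_connected_subgraph(graph):
--     label = {}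
--     for u, v, _, _, _ in graph:
--         if u not in label:
--             label[u] = u
--         if v not in label:
--             label[v] = v
--         lu, lv = label[u], label[v]
--         if lu != lv:
--             label = {k: (lv if x == lu else x) for k, x in label.items()}
--
--     components = {}
--     for edge in graph:
--         key = label[edge[0]]
--         if key not in components:
--             components[key] = []
--         components[key].append(edge)
--
--     return list(components.values())
-- ===== Notes on version B (the rewrite author's own statement) =====
-- stated objective: alternative
-- what changed: Replaces the recursive union-find with path compression by flat label propagation: a node-to-label dict where two components are merged by rewriting every occurrence of one label, followed by the same group-edges-by-label-of-source loop.
import Mathlib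
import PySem

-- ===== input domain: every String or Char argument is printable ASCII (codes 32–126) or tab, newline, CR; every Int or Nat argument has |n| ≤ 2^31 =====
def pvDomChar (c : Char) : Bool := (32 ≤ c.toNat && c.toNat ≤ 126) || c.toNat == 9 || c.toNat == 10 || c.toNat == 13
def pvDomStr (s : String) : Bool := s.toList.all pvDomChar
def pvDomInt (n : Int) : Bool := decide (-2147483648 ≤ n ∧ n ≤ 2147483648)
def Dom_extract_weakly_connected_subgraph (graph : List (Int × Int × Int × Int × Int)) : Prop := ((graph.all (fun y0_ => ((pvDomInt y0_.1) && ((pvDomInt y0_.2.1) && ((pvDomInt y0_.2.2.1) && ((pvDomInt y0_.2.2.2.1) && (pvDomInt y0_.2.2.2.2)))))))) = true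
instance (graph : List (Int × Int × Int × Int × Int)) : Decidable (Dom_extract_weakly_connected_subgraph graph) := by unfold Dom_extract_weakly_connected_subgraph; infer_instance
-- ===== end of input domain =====

-- B replaces the recursive union-find with path compression by flat label propagation
-- (a node→label dict; merging rewrites one label everywhere); the grouping loop is kept.

-- ===== PORT A =====
-- find(u): if parent[u] != u: parent[u] = find(parent[u]); return parent[u].
-- Fuel makes the recursion structural; fuel = parent.size always suffices because the parent
-- chains A builds are acyclic and lie inside the key set (the 0-fuel branch and the
-- missing-key default of getD are totality guards never reached at A's call sites).
def pvFind : Nat → PySem.Dict Int Int → Int → Int × PySem.Dict Int Int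
  | 0, d, u => (u, d)
  | n + 1, d, u =>
    let p := d.getD u u
    if p = u then (u, d)
    else
      let f := pvFind n d p
      (f.1, f.2.insert u f.1)

-- union(u, v): pu, pv = find(u), find(v); if pu != pv: parent[pu] = pv
def pvUnion (d : PySem.Dict Int Int) (u v : Int) : PySem.Dict Int Int :=
  let fu := pvFind d.size d u
  let fv := pvFind fu.2.size fu.2 v
  if fu.1 ≠ fv.1 then fv.2.insert fu.1 fv.1 else fv.2

-- body of A's init loop: insert missing self-parents, then union(u, v)
def pvInitStep (d : PySem.Dict Int Int) (e : Int × Int × Int × Int × Int) : PySem.Dict Int Int :=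
  let d1 := if d.contains e.1 then d else d.insert e.1 e.1
  let d2 := if d1.contains e.2.1 then d1 else d1.insert e.2.1 e.2.1
  pvUnion d2 e.1 e.2.1

def pvInit (graph : List (Int × Int × Int × Int × Int)) : PySem.Dict Int Int :=
  graph.foldl pvInitStep PySem.Dict.empty

-- body of A's grouping loop: root = find(edge[0]) (mutating parent); components[root].append(edge)
def pvGroupStepA (st : PySem.Dict Int Int × PySem.Dict Int (List (Int × Int × Int × Int × Int)))
    (e : Int × Int × Int × Int × Int) :
    PySem.Dict Int Int × PySem.Dict Int (List (Int × Int × Int × Int × Int)) :=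
  let f := pvFind st.1.size st.1 e.1
  (f.2, st.2.modify f.1 [] (· ++ [e]))

def extract_weakly_connected_subgraph (graph : List (Int × Int × Int × Int × Int)) : List (List (Int × Int × Int × Int × Int)) :=
  (graph.foldl pvGroupStepA (pvInit graph, PySem.Dict.empty)).2.values

-- ===== PORT B =====
-- merge step of Source B: if label[u] != label[v], rewrite label lu to lv over the whole dict
def pvRelabel (lab : PySem.Dict Int Int) (u v : Int) : PySem.Dict Int Int :=
  let lu := lab.getD u u      -- label[u]; the key is always present here
  let lv := lab.getD v v      -- label[v]
  if lu ≠ lv then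
    PySem.Dict.mk (lab.items.map (fun p => (p.1, if p.2 = lu then lv else p.2)))  -- the dict comprehension
  else lab

-- body of Source B's labelling loop
def pvLabelStep (lab : PySem.Dict Int Int) (e : Int × Int × Int × Int × Int) : PySem.Dict Int Int :=
  let l1 := if lab.contains e.1 then lab else lab.insert e.1 e.1
  let l2 := if l1.contains e.2.1 then l1 else l1.insert e.2.1 e.2.1
  pvRelabel l2 e.1 e.2.1

def pvLabels (graph : List (Int × Int × Int × Int × Int)) : PySem.Dict Int Int :=
  graph.foldl pvLabelStep PySem.Dict.empty

-- body of Source B's grouping loop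
def pvGroupStepB (lab : PySem.Dict Int Int)
    (c : PySem.Dict Int (List (Int × Int × Int × Int × Int))) (e : Int × Int × Int × Int × Int) :
    PySem.Dict Int (List (Int × Int × Int × Int × Int)) :=
  let key := lab.getD e.1 e.1
  let c1 := if c.contains key then c else c.insert key []
  c1.modify key [] (· ++ [e])

def extract_weakly_connected_subgraph_alt (graph : List (Int × Int × Int × Int × Int)) : List (List (Int × Int × Int × Int × Int)) :=
  (graph.foldl (pvGroupStepB (pvLabels graph)) PySem.Dict.empty).values

-- ===== PRECONDITION & SPEC =====
def Spec_extract_weakly_connected_subgraph (graph : List (Int × Int × Int × Int × Int)) (out : List (List (Int × Int × Int × Int × Int))) : Prop := out = extract_weakly_connected_subgraph_alt graph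
instance (graph : List (Int × Int × Int × Int × Int)) (out : List (List (Int × Int × Int × Int × Int))) : Decidable (Spec_extract_weakly_connected_subgraph graph out) := by unfold Spec_extract_weakly_connected_subgraph; infer_instance

-- ===== CLAIM (what is proved, stated in full; the proofs are below) =====
def Claim_equal_extract_weakly_connected_subgraph : Prop := ∀ (graph : List (Int × Int × Int × Int × Int)), Dom_extract_weakly_connected_subgraph graph → Spec_extract_weakly_connected_subgraph graph (extract_weakly_connected_subgraph graph)

-- ===== LEMMAS AND PROOFS =====

-- the parent-pointer step read by find (missing keys read as self-parented roots)
def pvPstep (d : PySem.Dict Int Int) (u : Int) : Int := d.getD u u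

-- pvChain d u r n: following parent pointers from u reaches the root r in n steps
inductive pvChain (d : PySem.Dict Int Int) : Int → Int → Nat → Prop
  | root (u : Int) (h : pvPstep d u = u) : pvChain d u u 0
  | step (u p r : Int) (n : Nat) (h : pvPstep d u = p) (hne : p ≠ u) (hc : pvChain d p r n) :
      pvChain d u r (n + 1)

lemma pvChain_last {d : PySem.Dict Int Int} {u r : Int} {n : Nat}
    (h : pvChain d u r n) : pvPstep d r = r := by
  induction h with
  | root _ h => exact h
  | step _ _ _ _ _ _ _ ih => exact ih

lemma pvChain_det {d : PySem.Dict Int Int} {u r : Int} {n : Nat}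
    (h : pvChain d u r n) : ∀ {s : Int} {m : Nat}, pvChain d u s m → r = s ∧ n = m := by
  induction h with
  | root u h =>
    intro s m h2
    cases h2 with
    | root => exact ⟨rfl, rfl⟩
    | step _ p _ _ h' hne _ => exact absurd (h'.symm.trans h) hne
  | step u p r n h hne hc ih =>
    intro s m h2
    cases h2 with
    | root _ h' => exact absurd (h.symm.trans h') hne
    | step _ p' _ n' h' hne' hc' =>
      have hp : p' = p := h'.symm.trans h
      subst hp
      obtain ⟨hr, hn⟩ := ih hc'
      exact ⟨hr, by omega⟩

lemma pvMem_of_pstep_ne {d : PySem.Dict Int Int} {u : Int}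
    (h : pvPstep d u ≠ u) : u ∈ d.keys := by
  by_contra hc
  apply h
  have hcontains : d.contains u = false := by
    by_contra hb
    exact hc ((PySem.Dict.contains_iff_mem_keys d u).1 (by simpa using hb))
  exact PySem.Dict.getD_of_not_contains d u hcontains

lemma pvPstep_insert (d : PySem.Dict Int Int) (k v w : Int) :
    pvPstep (d.insert k v) w = if w = k then v else pvPstep d w := by
  unfold pvPstep
  rw [PySem.Dict.getD_insert]

lemma pvChain_congr {d d' : PySem.Dict Int Int}
    (h : ∀ x, pvPstep d' x = pvPstep d x) {w s : Int} {k : Nat}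
    (hc : pvChain d w s k) : pvChain d' w s k := by
  induction hc with
  | root u hu => exact pvChain.root u ((h u).trans hu)
  | step u p r n hu hne _ ih => exact pvChain.step u p r n ((h u).trans hu) hne ih

-- path compression: inserting u ↦ (root of u) changes no root
lemma pvChain_compress {d : PySem.Dict Int Int} {u r : Int} {j : Nat}
    (hur : pvChain d u r j) {w s : Int} {k : Nat}
    (hc : pvChain d w s k) : ∃ k', pvChain (d.insert u r) w s k' := by
  induction hc with
  | root w hw =>
    by_cases hwu : w = u
    · subst hwu
      have := pvChain_det (pvChain.root w hw) hur
      obtain ⟨hs, _⟩ := this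
      refine ⟨0, pvChain.root w ?_⟩
      rw [pvPstep_insert, if_pos rfl, ← hs]
    · exact ⟨0, pvChain.root w (by rw [pvPstep_insert, if_neg hwu]; exact hw)⟩
  | step w p s n hw hne hcp ih =>
    by_cases hwu : w = u
    · subst hwu
      have hsr : s = r ∧ n + 1 = j := pvChain_det (pvChain.step w p s n hw hne hcp) hur
      obtain ⟨hsr, _⟩ := hsr
      subst hsr
      have hroot : pvPstep d s = s := pvChain_last hur
      have hrw : s ≠ w := by
        intro h
        rw [h] at hroot
        exact hne (hw.symm.trans hroot)
      refine ⟨1, pvChain.step w s s 0 ?_ hrw (pvChain.root s ?_)⟩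
      · rw [pvPstep_insert, if_pos rfl]
      · rw [pvPstep_insert, if_neg hrw]
        exact hroot
    · obtain ⟨k', hk'⟩ := ih
      exact ⟨k' + 1, pvChain.step w p s k' (by rw [pvPstep_insert, if_neg hwu]; exact hw) hne hk'⟩

-- specification of pvFind: given a chain of length m ≤ fuel, find returns the root,
-- keeps the key list, and preserves every root
lemma pvFind_spec : ∀ (m : Nat) (d : PySem.Dict Int Int) (u r : Int),
    pvChain d u r m → ∀ fuel, m ≤ fuel →
    (pvFind fuel d u).1 = r ∧ (pvFind fuel d u).2.keys = d.keys ∧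
    (∀ w s k, pvChain d w s k → ∃ k', pvChain (pvFind fuel d u).2 w s k') := by
  intro m
  induction m with
  | zero =>
    intro d u r hc fuel _
    have hru : r = u ∧ pvPstep d u = u := by cases hc with | root _ h => exact ⟨rfl, h⟩
    obtain ⟨hru, hstep⟩ := hru
    have heval : pvFind fuel d u = (u, d) := by
      cases fuel with
      | zero => rfl
      | succ n =>
        unfold pvPstep at hstep
        simp [pvFind, hstep]
    rw [heval, hru]
    exact ⟨rfl, rfl, fun w s k h => ⟨k, h⟩⟩
  | succ n ih =>
    intro d u r hc fuel hfuel
    obtain ⟨f, rfl⟩ : ∃ f, fuel = f + 1 := ⟨fuel - 1, by omega⟩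
    obtain ⟨p, hp, hpu, hcp⟩ : ∃ p, pvPstep d u = p ∧ p ≠ u ∧ pvChain d p r n := by
      cases hc with | step _ p _ _ h hne hcp => exact ⟨p, h, hne, hcp⟩
    obtain ⟨h1, h2, h3⟩ := ih d p r hcp f (by omega)
    have heval : pvFind (f + 1) d u = ((pvFind f d p).1, (pvFind f d p).2.insert u (pvFind f d p).1) := by
      unfold pvPstep at hp
      simp [pvFind, hp, hpu]
    rw [heval]
    have hukeys : u ∈ (pvFind f d p).2.keys := by
      rw [h2]
      exact pvMem_of_pstep_ne (fun h => hpu (hp.symm.trans h))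
    have hcontains : (pvFind f d p).2.contains u = true :=
      (PySem.Dict.contains_iff_mem_keys _ u).2 hukeys
    refine ⟨by rw [h1], ?_, ?_⟩
    · rw [PySem.Dict.keys_insert_of_contains _ _ hcontains, h2]
    · intro w s k hw
      obtain ⟨k1, hk1⟩ := h3 w s k hw
      obtain ⟨j, hj⟩ := h3 u r (n + 1) hc
      rw [h1]
      exact pvChain_compress hj hk1

-- a chain has distinct non-root nodes all among the keys, so its length is at most d.size
lemma pvChain_nodes {d : PySem.Dict Int Int} {w s : Int} {k : Nat}
    (hc : pvChain d w s k) :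
    ∃ l : List Int, l.length = k ∧ (∀ x ∈ l, x ∈ d.keys) ∧
      (∀ i : Fin l.length, pvChain d (l.get i) s (k - i)) := by
  induction hc with
  | root u _ => exact ⟨[], rfl, by simp, fun i => absurd i.isLt (by simp)⟩
  | step u p r n h hne hcp ih =>
    obtain ⟨l, hlen, hmem, hidx⟩ := ih
    refine ⟨u :: l, by simp [hlen], ?_, ?_⟩
    · intro x hx
      rcases List.mem_cons.mp hx with rfl | hx
      · exact pvMem_of_pstep_ne (fun hh => hne (h.symm.trans hh))
      · exact hmem x hx
    · intro i
      rcases i with ⟨iv, hiv⟩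
      cases iv with
      | zero => simpa using pvChain.step u p r n h hne hcp
      | succ j =>
        have hj : j < l.length := by simpa using hiv
        have := hidx ⟨j, hj⟩
        simpa [hlen, Nat.succ_sub_succ] using this

lemma pvChain_le_size {d : PySem.Dict Int Int} {w s : Int} {k : Nat}
    (hc : pvChain d w s k) : k ≤ d.size := by
  obtain ⟨l, hlen, hmem, hidx⟩ := pvChain_nodes hc
  have hnodup : l.Nodup := by
    rw [List.nodup_iff_injective_get]
    intro i j hij
    have hi := hidx i
    have hj := hidx j
    rw [hij] at hi
    obtain ⟨_, hn⟩ := pvChain_det hi hj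
    have : (i : Nat) = (j : Nat) := by
      have hi' := i.isLt
      have hj' := j.isLt
      omega
    exact Fin.ext this
  have hle : l.length ≤ d.keys.length :=
    (List.subperm_of_subset hnodup (fun x hx => hmem x hx)).length_le
  have hsz : d.keys.length = d.size := by
    simp [PySem.Dict.keys, PySem.Dict.size]
  omega

-- linking a root ru under a root rv moves every root-ru chain to rv and fixes all others
lemma pvChain_link {d : PySem.Dict Int Int} {ru rv : Int}
    (hru : pvPstep d ru = ru) (hrv : pvPstep d rv = rv) (hne : ru ≠ rv) :
    ∀ {w s : Int} {k : Nat}, pvChain d w s k →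
      ∃ k', pvChain (d.insert ru rv) w (if s = ru then rv else s) k' := by
  intro w s k hc
  induction hc with
  | root w hw =>
    by_cases hwu : w = ru
    · subst hwu
      refine ⟨1, ?_⟩
      rw [if_pos rfl]
      refine pvChain.step w rv rv 0 ?_ (fun h => hne h.symm) (pvChain.root rv ?_)
      · rw [pvPstep_insert, if_pos rfl]
      · rw [pvPstep_insert, if_neg (fun h => hne h.symm), hrv]
    · refine ⟨0, ?_⟩
      rw [if_neg hwu]
      exact pvChain.root w (by rw [pvPstep_insert, if_neg hwu]; exact hw)
  | step w p s n hw hpw hcp ih =>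
    obtain ⟨k', hk'⟩ := ih
    have hwru : w ≠ ru := by
      intro h
      subst h
      exact hpw (hru.symm.trans hw).symm
    refine ⟨k' + 1, pvChain.step w p _ k' ?_ hpw hk'⟩
    rw [pvPstep_insert, if_neg hwru]
    exact hw

-- the invariant tying A's parent forest to B's label dict: same keys, labels are
-- (roots of) keys, and every key's parent chain ends at exactly its label
def pvGood (d lab : PySem.Dict Int Int) : Prop :=
  d.keys = lab.keys ∧
  (∀ w ∈ d.keys, lab.getD w w ∈ d.keys) ∧
  (∀ w ∈ d.keys, ∃ k, pvChain d w (lab.getD w w) k)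

lemma pvGet?_mk_map (l : List (Int × Int)) (g : Int → Int) (w : Int) :
    (PySem.Dict.mk (l.map (fun p => (p.1, g p.2)))).get? w
      = ((PySem.Dict.mk l).get? w).map g := by
  induction l with
  | nil => simp [PySem.Dict.get?]
  | cons a l ih =>
    simp only [List.map_cons]
    rw [PySem.Dict.get?_mk_cons, PySem.Dict.get?_mk_cons]
    by_cases h : (a.1 == w) = true
    · simp [h]
    · have h' : (a.1 == w) = false := by simpa using h
      rw [h']
      simp only [Bool.false_eq_true, if_false]
      exact ih

lemma pvKeys_mk_map (l : List (Int × Int)) (g : Int → Int) :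
    (PySem.Dict.mk (l.map (fun p => (p.1, g p.2)))).keys = (PySem.Dict.mk l).keys := by
  simp [PySem.Dict.keys]

lemma pvGetD_relabel (lab : PySem.Dict Int Int) (g : Int → Int) (w : Int) (hw : w ∈ lab.keys) :
    (PySem.Dict.mk (lab.items.map (fun p => (p.1, g p.2)))).getD w w = g (lab.getD w w) := by
  obtain ⟨x, hx⟩ : ∃ x, lab.get? w = some x := by
    cases hget : lab.get? w with
    | some x => exact ⟨x, rfl⟩
    | none => exact absurd hw ((PySem.Dict.get?_eq_none_iff_not_mem_keys _ _).1 hget)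
  have h2 := pvGet?_mk_map lab.items g w
  have hmk : PySem.Dict.mk lab.items = lab := rfl
  rw [hmk] at h2
  simp [PySem.Dict.getD, h2, hx]

-- inserting a missing self-parent changes neither roots nor labels
lemma pvGood_selfinsert {d lab : PySem.Dict Int Int} {u : Int} (hg : pvGood d lab) :
    pvGood (if d.contains u then d else d.insert u u)
           (if lab.contains u then lab else lab.insert u u) ∧
    (∀ x ∈ d.keys, x ∈ (if d.contains u then d else d.insert u u).keys) ∧
    u ∈ (if d.contains u then d else d.insert u u).keys := by
  obtain ⟨hk, hvals, hch⟩ := hg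
  have hcond : lab.contains u = d.contains u := by
    rw [PySem.Dict.contains_eq_decide_mem_keys, PySem.Dict.contains_eq_decide_mem_keys, hk]
  by_cases h : d.contains u = true
  · rw [h] at hcond
    simp only [h, hcond, if_true]
    exact ⟨⟨hk, hvals, hch⟩, fun x hx => hx, (PySem.Dict.contains_iff_mem_keys d u).1 h⟩
  · have h' : d.contains u = false := by simpa using h
    rw [h'] at hcond
    simp only [h', hcond, Bool.false_eq_true, if_false]
    have hpd : pvPstep d u = u := PySem.Dict.getD_of_not_contains d u h'
    have hps : ∀ x, pvPstep (d.insert u u) x = pvPstep d x := by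
      intro x
      rw [pvPstep_insert]
      by_cases hx : x = u
      · subst hx; rw [if_pos rfl, hpd]
      · rw [if_neg hx]
    have hunot : u ∉ d.keys := fun hm =>
      by simp [((PySem.Dict.contains_iff_mem_keys d u).2 hm)] at h'
    have hkeys' : (d.insert u u).keys = d.keys ++ [u] :=
      PySem.Dict.keys_insert_of_not_contains d u h'
    have hlkeys' : (lab.insert u u).keys = lab.keys ++ [u] :=
      PySem.Dict.keys_insert_of_not_contains lab u hcond
    have hgetD : ∀ w, (lab.insert u u).getD w w = if w = u then u else lab.getD w w := by
      intro w; rw [PySem.Dict.getD_insert]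
    refine ⟨⟨by rw [hkeys', hlkeys', hk], ?_, ?_⟩, ?_, ?_⟩
    · intro w hw
      rw [hkeys', List.mem_append] at hw ⊢
      rcases hw with hw | hw
      · have hwu : w ≠ u := fun hh => hunot (hh ▸ hw)
        rw [hgetD, if_neg hwu]
        exact Or.inl (hvals w hw)
      · simp only [List.mem_singleton] at hw
        subst hw
        rw [hgetD, if_pos rfl]
        exact Or.inr (by simp)
    · intro w hw
      rw [hkeys', List.mem_append] at hw
      rcases hw with hw | hw
      · have hwu : w ≠ u := fun hh => hunot (hh ▸ hw)
        rw [hgetD, if_neg hwu]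
        obtain ⟨k, hc⟩ := hch w hw
        exact ⟨k, pvChain_congr hps hc⟩
      · simp only [List.mem_singleton] at hw
        subst hw
        rw [hgetD, if_pos rfl]
        exact ⟨0, pvChain.root w (by rw [hps]; exact hpd)⟩
    · intro x hx
      rw [hkeys']
      exact List.mem_append.2 (Or.inl hx)
    · rw [hkeys']
      exact List.mem_append.2 (Or.inr (by simp))

-- union(u,v) and B's relabel step preserve the invariant, keeping the key list
lemma pvGood_union {d lab : PySem.Dict Int Int} {u v : Int} (hg : pvGood d lab)
    (hu : u ∈ d.keys) (hv : v ∈ d.keys) :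
    pvGood (pvUnion d u v) (pvRelabel lab u v) ∧ (pvUnion d u v).keys = d.keys := by
  obtain ⟨hk, hvals, hch⟩ := hg
  obtain ⟨k1, hc1⟩ := hch u hu
  obtain ⟨k2, hc2⟩ := hch v hv
  obtain ⟨ha1, ha2, ha3⟩ := pvFind_spec k1 d u _ hc1 d.size (pvChain_le_size hc1)
  obtain ⟨k2', hc2'⟩ := ha3 v _ k2 hc2
  obtain ⟨hb1, hb2, hb3⟩ :=
    pvFind_spec k2' (pvFind d.size d u).2 v _ hc2'
      (pvFind d.size d u).2.size (pvChain_le_size hc2')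
  set d4 := (pvFind (pvFind d.size d u).2.size (pvFind d.size d u).2 v).2 with hd4
  have hkeys4 : d4.keys = d.keys := hb2.trans ha2
  have htrans : ∀ w s k, pvChain d w s k → ∃ k', pvChain d4 w s k' := by
    intro w s k hcw
    obtain ⟨j1, hj1⟩ := ha3 w s k hcw
    exact hb3 w s j1 hj1
  have hunion : pvUnion d u v =
      if lab.getD u u ≠ lab.getD v v then d4.insert (lab.getD u u) (lab.getD v v) else d4 := by
    show (if (pvFind d.size d u).1 ≠ (pvFind (pvFind d.size d u).2.size (pvFind d.size d u).2 v).1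
        then (pvFind (pvFind d.size d u).2.size (pvFind d.size d u).2 v).2.insert
          (pvFind d.size d u).1 (pvFind (pvFind d.size d u).2.size (pvFind d.size d u).2 v).1
        else (pvFind (pvFind d.size d u).2.size (pvFind d.size d u).2 v).2) = _
    rw [ha1, hb1]
  have hrelabel : pvRelabel lab u v =
      if lab.getD u u ≠ lab.getD v v then
        PySem.Dict.mk (lab.items.map
          (fun p => (p.1, if p.2 = lab.getD u u then lab.getD v v else p.2)))
      else lab := rfl
  by_cases hlulv : lab.getD u u = lab.getD v v
  · rw [hunion, hrelabel, if_neg (by simpa using hlulv), if_neg (by simpa using hlulv)]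
    refine ⟨⟨hkeys4.trans hk, ?_, ?_⟩, hkeys4⟩
    · intro w hw; rw [hkeys4] at hw ⊢; exact hvals w hw
    · intro w hw
      rw [hkeys4] at hw
      obtain ⟨k, hc⟩ := hch w hw
      exact htrans w _ k hc
  · rw [hunion, hrelabel, if_pos (by simpa using hlulv), if_pos (by simpa using hlulv)]
    obtain ⟨j1, hj1⟩ := htrans u _ k1 hc1
    obtain ⟨j2, hj2⟩ := htrans v _ k2 hc2
    have hru : pvPstep d4 (lab.getD u u) = lab.getD u u := pvChain_last hj1
    have hrv : pvPstep d4 (lab.getD v v) = lab.getD v v := pvChain_last hj2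
    have hlukeys : lab.getD u u ∈ d4.keys := by rw [hkeys4]; exact hvals u hu
    have hcont : d4.contains (lab.getD u u) = true :=
      (PySem.Dict.contains_iff_mem_keys _ _).2 hlukeys
    have hkeys5 : (d4.insert (lab.getD u u) (lab.getD v v)).keys = d.keys := by
      rw [PySem.Dict.keys_insert_of_contains _ _ hcont, hkeys4]
    have hlabkeys : (PySem.Dict.mk (lab.items.map
        (fun p => (p.1, if p.2 = lab.getD u u then lab.getD v v else p.2)))).keys = lab.keys := by
      have := pvKeys_mk_map lab.items (fun x => if x = lab.getD u u then lab.getD v v else x)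
      exact this
    have hlabget : ∀ w ∈ lab.keys, (PySem.Dict.mk (lab.items.map
        (fun p => (p.1, if p.2 = lab.getD u u then lab.getD v v else p.2)))).getD w w
        = if lab.getD w w = lab.getD u u then lab.getD v v else lab.getD w w := by
      intro w hw
      exact pvGetD_relabel lab (fun x => if x = lab.getD u u then lab.getD v v else x) w hw
    refine ⟨⟨by rw [hkeys5, hlabkeys, hk], ?_, ?_⟩, hkeys5⟩
    · intro w hw
      rw [hkeys5] at hw ⊢
      rw [hlabget w (hk ▸ hw)]
      by_cases hcase : lab.getD w w = lab.getD u u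
      · rw [if_pos hcase]; exact hvals v hv
      · rw [if_neg hcase]; exact hvals w hw
    · intro w hw
      rw [hkeys5] at hw
      obtain ⟨k, hc⟩ := hch w hw
      obtain ⟨j, hj⟩ := htrans w _ k hc
      obtain ⟨k', hk'⟩ := pvChain_link hru hrv hlulv hj
      rw [hlabget w (hk ▸ hw)]
      exact ⟨k', hk'⟩

-- one edge of the init loop preserves the invariant and only grows the key set
lemma pvStep_good {d lab : PySem.Dict Int Int} {e : Int × Int × Int × Int × Int}
    (hg : pvGood d lab) :
    pvGood (pvInitStep d e) (pvLabelStep lab e) ∧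
    (∀ x ∈ d.keys, x ∈ (pvInitStep d e).keys) ∧ e.1 ∈ (pvInitStep d e).keys := by
  obtain ⟨hg1, hsub1, hmem1⟩ := pvGood_selfinsert (u := e.1) hg
  obtain ⟨hg2, hsub2, hmem2⟩ := pvGood_selfinsert (u := e.2.1) hg1
  have hu : e.1 ∈ (if (if d.contains e.1 then d else d.insert e.1 e.1).contains e.2.1
      then (if d.contains e.1 then d else d.insert e.1 e.1)
      else (if d.contains e.1 then d else d.insert e.1 e.1).insert e.2.1 e.2.1).keys :=
    hsub2 e.1 hmem1
  obtain ⟨hg3, hkeys3⟩ := pvGood_union hg2 hu hmem2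
  refine ⟨hg3, ?_, ?_⟩
  · intro x hx
    show x ∈ (pvUnion _ e.1 e.2.1).keys
    rw [hkeys3]
    exact hsub2 x (hsub1 x hx)
  · show e.1 ∈ (pvUnion _ e.1 e.2.1).keys
    rw [hkeys3]
    exact hu

-- the whole init loop: A's forest and B's labels stay linked; all sources become keys
lemma pvInit_fold : ∀ (l : List (Int × Int × Int × Int × Int)) (d lab : PySem.Dict Int Int),
    pvGood d lab →
    pvGood (l.foldl pvInitStep d) (l.foldl pvLabelStep lab) ∧
    (∀ x ∈ d.keys, x ∈ (l.foldl pvInitStep d).keys) ∧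
    (∀ e ∈ l, e.1 ∈ (l.foldl pvInitStep d).keys) := by
  intro l
  induction l with
  | nil => exact fun d lab hg => ⟨hg, fun x hx => hx, by simp⟩
  | cons e l ih =>
    intro d lab hg
    obtain ⟨hg', hsub, hmem⟩ := pvStep_good (e := e) hg
    obtain ⟨hgf, hsubf, hmemf⟩ := ih _ _ hg'
    simp only [List.foldl_cons]
    refine ⟨hgf, fun x hx => hsubf x (hsub x hx), ?_⟩
    intro e' he'
    rcases List.mem_cons.mp he' with rfl | he'
    · exact hsubf e'.1 hmem
    · exact hmemf e' he'

-- B's "if key not in components: components[key] = []" then append equals A's defaultdict append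
lemma pvSetdefault_modify (c : PySem.Dict Int (List (Int × Int × Int × Int × Int))) (k : Int)
    (f : List (Int × Int × Int × Int × Int) → List (Int × Int × Int × Int × Int)) :
    (if c.contains k then c else c.insert k []).modify k [] f = c.modify k [] f := by
  by_cases h : c.contains k = true
  · simp [h]
  · have h' : c.contains k = false := by simpa using h
    simp only [h', Bool.false_eq_true, if_false]
    unfold PySem.Dict.modify
    rw [PySem.Dict.getD_insert_self, PySem.Dict.insert_insert_self,
        PySem.Dict.getD_of_not_contains c [] h']

-- the two grouping loops build the same components dict
lemma pvGroup_fold : ∀ (l : List (Int × Int × Int × Int × Int)) (d : PySem.Dict Int Int)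
    (c : PySem.Dict Int (List (Int × Int × Int × Int × Int))) (lab : PySem.Dict Int Int),
    (∀ w ∈ d.keys, ∃ k, pvChain d w (lab.getD w w) k) → (∀ e ∈ l, e.1 ∈ d.keys) →
    (l.foldl pvGroupStepA (d, c)).2 = l.foldl (pvGroupStepB lab) c := by
  intro l
  induction l with
  | nil => intro d c lab _ _; rfl
  | cons e l ih =>
    intro d c lab hch hmem
    have he : e.1 ∈ d.keys := hmem e List.mem_cons_self
    obtain ⟨k, hc⟩ := hch e.1 he
    obtain ⟨h1, h2, h3⟩ := pvFind_spec k d e.1 _ hc d.size (pvChain_le_size hc)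
    simp only [List.foldl_cons]
    have hstepA : pvGroupStepA (d, c) e =
        ((pvFind d.size d e.1).2, c.modify (lab.getD e.1 e.1) [] (· ++ [e])) := by
      show ((pvFind d.size d e.1).2, c.modify (pvFind d.size d e.1).1 [] (· ++ [e])) = _
      rw [h1]
    have hstepB : pvGroupStepB lab c e = c.modify (lab.getD e.1 e.1) [] (· ++ [e]) := by
      show (if c.contains (lab.getD e.1 e.1) then c else c.insert (lab.getD e.1 e.1) []).modify
          (lab.getD e.1 e.1) [] (· ++ [e]) = _
      exact pvSetdefault_modify c _ _
    rw [hstepA, hstepB]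
    apply ih
    · intro w hw
      rw [h2] at hw
      obtain ⟨j, hj⟩ := hch w hw
      exact h3 w _ j hj
    · intro e' he'
      rw [h2]
      exact hmem e' (List.mem_cons_of_mem e he')

-- ===== VERDICT (by name: the statement is the Claim_ definition above) =====
theorem extract_weakly_connected_subgraph_spec : Claim_equal_extract_weakly_connected_subgraph := by
  intro graph _
  unfold Spec_extract_weakly_connected_subgraph
  unfold extract_weakly_connected_subgraph extract_weakly_connected_subgraph_alt
  have hempty : pvGood PySem.Dict.empty PySem.Dict.empty := by
    refine ⟨rfl, ?_, ?_⟩ <;> intro w hw <;> simp [PySem.Dict.keys_empty] at hw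
  obtain ⟨⟨hk, hvals, hch⟩, _, hmem⟩ :=
    pvInit_fold graph PySem.Dict.empty PySem.Dict.empty hempty
  exact congrArg PySem.Dict.values
    (pvGroup_fold graph (pvInit graph) PySem.Dict.empty (pvLabels graph) hch hmem)
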